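-- pv_equiv track=rewrite | github.com/Douile/royale-bot | utils/strings.py | num_after
-- ===== SOURCE A (Python) =====
-- def num_after(string,text):
--     i = string.find(text)+len(text)
--     b = string[i:]
--     s = ''
--     for c in range(0,len(b)):
--         d = ord(b[c])
--         if d > 47 and d < 58:
--             s += b[c]
--         else:
--             if len(s) > 0:
--                 break
--     try:
--         v = int(s)
--     except ValueError:
--         v = None
--     return v
-- ===== SOURCE B (Python) =====
-- def num_after(string, text):
--     b = string[string.find(text) + len(text):]
--     start = next((j for j, ch in enumerate(b) if ch.isdigit()), len(b))
--     end = start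
--     while end < len(b) and b[end].isdigit():
--         end += 1
--     return int(b[start:end]) if end > start else None
-- ===== Notes on version B (the rewrite author's own statement) =====
-- stated objective: simpler
-- what changed: Replaces the per-character accumulator automaton with break logic by an index computation: find the first digit position, extend it to the end of the digit run, and convert that single slice; no string is built character by character.
import Mathlib
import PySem

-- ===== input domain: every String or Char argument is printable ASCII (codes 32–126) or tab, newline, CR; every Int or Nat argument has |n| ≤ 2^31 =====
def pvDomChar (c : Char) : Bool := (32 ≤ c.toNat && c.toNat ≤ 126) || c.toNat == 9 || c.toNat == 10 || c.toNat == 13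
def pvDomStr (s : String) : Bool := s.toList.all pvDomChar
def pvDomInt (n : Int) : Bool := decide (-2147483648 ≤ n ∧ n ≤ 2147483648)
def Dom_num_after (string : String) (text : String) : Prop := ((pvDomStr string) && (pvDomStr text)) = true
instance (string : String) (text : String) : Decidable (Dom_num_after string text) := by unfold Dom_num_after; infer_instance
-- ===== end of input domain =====

-- B replaces A's per-character accumulator automaton (with its break logic) by an index
-- computation: first digit position, end of the digit run, one slice converted with int() (objective: simpler).

-- ===== PORT A =====
-- the for-loop over range(0,len(b)) with accumulator s and early break; structural recursion over b
def pvLoopA : List Char → List Char → List Char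
  | [], s => s
  | ch :: rest, s =>
      let d := ch.toNat
      if 47 < d ∧ d < 58 then pvLoopA rest (s ++ [ch])
      else if s.length > 0 then s        -- break
      else pvLoopA rest s

def num_after (string : String) (text : String) : Option Int :=
  let i : Int := PySem.Str.find string text + PySem.Str.len text
  let b : List Char := PySem.List.slice string.toList (some i) none
  let s : List Char := pvLoopA b []
  PySem.Int.ofChars? s                   -- try: v = int(s) / except ValueError: v = None

-- ===== PORT B =====
-- start = next((j for j, ch in enumerate(b) if ch.isdigit()), len(b))
def pvFirstDigit : List Char → Nat → Nat
  | [], k => k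
  | ch :: rest, k => if PySem.Chars.isdigit ch then k else pvFirstDigit rest (k + 1)

-- while end < len(b) and b[end].isdigit(): end += 1
def pvRunEnd (b : List Char) (e : Nat) : Nat :=
  if h : e < b.length then
    if PySem.Chars.isdigit b[e] then pvRunEnd b (e + 1) else e
  else e
termination_by b.length - e

def num_after_alt (string : String) (text : String) : Option Int :=
  let b : List Char := PySem.List.slice string.toList
      (some (PySem.Str.find string text + PySem.Str.len text)) none
  let start := pvFirstDigit b 0
  let stop := pvRunEnd b start
  if start < stop then
    PySem.Int.ofChars? (PySem.List.slice b (some (start : Int)) (some (stop : Int)))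
  else none

-- ===== PRECONDITION & SPEC =====
def Spec_num_after (string : String) (text : String) (out : Option Int) : Prop := out = num_after_alt string text
instance (string : String) (text : String) (out : Option Int) : Decidable (Spec_num_after string text out) := by unfold Spec_num_after; infer_instance

-- ===== CLAIM (what is proved, stated in full; the proofs are below) =====
def Claim_equal_num_after : Prop := ∀ (string : String) (text : String), Dom_num_after string text → Spec_num_after string text (num_after string text)

-- ===== LEMMAS AND PROOFS =====

-- A's ord-based digit test agrees with str.isdigit
theorem pv_dig_iff (c : Char) : (47 < c.toNat ∧ c.toNat < 58) ↔ PySem.Chars.isdigit c = true := by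
  simp only [PySem.Chars.isdigit, Bool.and_eq_true, decide_eq_true_eq, Char.le_def,
    UInt32.le_iff_toNat_le]
  show _ ↔ (48 ≤ c.val.toNat ∧ c.val.toNat ≤ 57)
  show (47 < c.val.toNat ∧ c.val.toNat < 58) ↔ _
  omega

theorem pv_not_dig (c : Char) (hd : ¬ (47 < c.toNat ∧ c.toNat < 58)) :
    PySem.Chars.isdigit c = false := by
  rcases h : PySem.Chars.isdigit c with _ | _
  · rfl
  · exact absurd ((pv_dig_iff c).mpr h) hd

-- once s is nonempty, A's loop appends exactly the leading digit run of the rest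
theorem pvLoopA_ne_nil (b s : List Char) (hs : s ≠ []) :
    pvLoopA b s = s ++ b.takeWhile PySem.Chars.isdigit := by
  induction b generalizing s with
  | nil => simp [pvLoopA]
  | cons ch rest ih =>
      by_cases hd : 47 < ch.toNat ∧ ch.toNat < 58
      · rw [List.takeWhile_cons, (pv_dig_iff ch).mp hd]
        simp only [pvLoopA, if_pos hd]
        rw [ih (s ++ [ch]) (by simp)]
        simp
      · have hlen : 0 < s.length := List.length_pos_iff.mpr hs
        rw [List.takeWhile_cons, pv_not_dig ch hd]
        simp only [pvLoopA, if_neg hd, if_pos hlen]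
        simp

-- A's loop result is the first maximal digit run
theorem pvLoopA_nil (b : List Char) :
    pvLoopA b [] = (b.dropWhile (fun c => !PySem.Chars.isdigit c)).takeWhile PySem.Chars.isdigit := by
  induction b with
  | nil => simp [pvLoopA]
  | cons ch rest ih =>
      by_cases hd : 47 < ch.toNat ∧ ch.toNat < 58
      · have hdig := (pv_dig_iff ch).mp hd
        rw [List.dropWhile_cons]
        simp only [hdig, Bool.not_true, Bool.false_eq_true, if_false]
        rw [List.takeWhile_cons, hdig]
        simp only [pvLoopA, if_pos hd]
        rw [show ([]:List Char) ++ [ch] = [ch] from rfl, pvLoopA_ne_nil rest [ch] (by simp)]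
        simp
      · have hdig := pv_not_dig ch hd
        rw [List.dropWhile_cons]
        simp only [hdig, Bool.not_false]
        simp only [pvLoopA, if_neg hd]
        simpa using ih

theorem pvFirstDigit_eq (b : List Char) (k : Nat) :
    pvFirstDigit b k = k + (b.takeWhile (fun c => !PySem.Chars.isdigit c)).length := by
  induction b generalizing k with
  | nil => simp [pvFirstDigit]
  | cons ch rest ih =>
      rcases h : PySem.Chars.isdigit ch with _ | _
      · rw [List.takeWhile_cons]
        simp only [h, Bool.not_false]
        simp only [pvFirstDigit, h, if_neg Bool.false_ne_true, ih]
        simp; omega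
      · rw [List.takeWhile_cons]
        simp only [h, Bool.not_true]
        simp [pvFirstDigit, h]

theorem pvRunEnd_eq (b : List Char) (e : Nat) :
    pvRunEnd b e = e + ((b.drop e).takeWhile PySem.Chars.isdigit).length := by
  rw [pvRunEnd]
  by_cases h : e < b.length
  · have hdrop : b.drop e = b[e] :: b.drop (e + 1) := List.drop_eq_getElem_cons h
    rw [hdrop, List.takeWhile_cons]
    rcases hd : PySem.Chars.isdigit b[e] with _ | _
    · simp [h, hd]
    · rw [dif_pos h, if_pos hd, pvRunEnd_eq b (e + 1)]
      simp
      omega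
  · rw [dif_neg h, List.drop_eq_nil_of_le (by omega)]
    simp
termination_by b.length - e

theorem pv_take_takeWhile {α : Type} (p : α → Bool) (l : List α) :
    l.take (l.takeWhile p).length = l.takeWhile p :=
  (List.prefix_iff_eq_take.mp (List.takeWhile_prefix p)).symm

theorem pv_drop_takeWhile_length {α : Type} (p : α → Bool) (l : List α) :
    l.drop (l.takeWhile p).length = l.dropWhile p := by
  nth_rewrite 2 [← List.takeWhile_append_dropWhile (p := p) (l := l)]
  exact List.drop_left

-- both post-processings of the common suffix b agree
theorem pv_main (b : List Char) :
    PySem.Int.ofChars? (pvLoopA b []) =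
      (if pvFirstDigit b 0 < pvRunEnd b (pvFirstDigit b 0) then
        PySem.Int.ofChars? (PySem.List.slice b (some ((pvFirstDigit b 0 : Nat) : Int))
          (some ((pvRunEnd b (pvFirstDigit b 0) : Nat) : Int)))
      else none) := by
  have hstart : pvFirstDigit b 0 = (b.takeWhile (fun c => !PySem.Chars.isdigit c)).length := by
    simpa using pvFirstDigit_eq b 0
  have hdropstart : b.drop (pvFirstDigit b 0) = b.dropWhile (fun c => !PySem.Chars.isdigit c) := by
    rw [hstart, pv_drop_takeWhile_length]
  have hstop : pvRunEnd b (pvFirstDigit b 0) = pvFirstDigit b 0 +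
      ((b.dropWhile (fun c => !PySem.Chars.isdigit c)).takeWhile PySem.Chars.isdigit).length := by
    rw [pvRunEnd_eq, hdropstart]
  rw [pvLoopA_nil]
  by_cases hrun : ((b.dropWhile (fun c => !PySem.Chars.isdigit c)).takeWhile PySem.Chars.isdigit) = []
  · have hnlt : ¬ pvFirstDigit b 0 < pvRunEnd b (pvFirstDigit b 0) := by
      rw [hstop, hrun]; simp
    rw [if_neg hnlt, hrun]
    decide
  · have hlt : pvFirstDigit b 0 < pvRunEnd b (pvFirstDigit b 0) := by
      rw [hstop]
      have := List.length_pos_iff.mpr hrun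
      omega
    rw [if_pos hlt]
    congr 1
    rw [PySem.List.slice_natCast, hdropstart, hstop, Nat.add_sub_cancel_left]
    exact (pv_take_takeWhile _ _).symm

-- ===== VERDICT (by name: the statement is the Claim_ definition above) =====
theorem num_after_spec : Claim_equal_num_after := by
  intro string text _
  unfold Spec_num_after num_after num_after_alt
  exact pv_main _
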